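-- pv_equiv track=rewrite | github.com/tomislavrupic/HAOS-IIP | archive-pre-refactor/numerics/simulations/stage13_resolution_interaction_coupling.py | selected_cases
-- ===== SOURCE A (Python) =====
-- from typing import Any
--
-- def selected_cases(all_cases: list[dict[str, Any]], case_ids: list[str], max_cases: int) -> list[dict[str, Any]]:
--     cases = all_cases
--     if case_ids:
--         wanted = set(case_ids)
--         cases = [case for case in cases if case['case_id'] in wanted]
--     if max_cases > 0:
--         cases = cases[:max_cases]
--     return cases
-- ===== SOURCE B (Python) =====
-- def selected_cases(all_cases: list, case_ids: list, max_cases: int) -> list: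
--     # Inverted-index approach: group the positions of all_cases by case_id once,
--     # gather the position lists of the wanted ids, sort them to restore input order,
--     # and fetch the cases by position.  Returns all_cases itself when no filter applies.
--     if case_ids:
--         by_id = {}
--         for pos, case in enumerate(all_cases):
--             by_id.setdefault(case['case_id'], []).append(pos)
--         positions = sorted(p for cid in set(case_ids) for p in by_id.get(cid, []))
--         cases = [all_cases[p] for p in positions]
--     else:
--         cases = all_cases
--     if max_cases > 0:
--         cases = cases[:max_cases]
--     return cases
-- ===== Notes on version B (the rewrite author's own statement) =====
-- stated objective: alternative
-- what changed: Replaces A's direct membership-filter comprehension with an inverted index: one pass groups the positions of all_cases by case_id into a dict, the position lists of the wanted ids are gathered and sorted to restore input order, and the cases are fetched by position before the same truncation.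
import Mathlib
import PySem

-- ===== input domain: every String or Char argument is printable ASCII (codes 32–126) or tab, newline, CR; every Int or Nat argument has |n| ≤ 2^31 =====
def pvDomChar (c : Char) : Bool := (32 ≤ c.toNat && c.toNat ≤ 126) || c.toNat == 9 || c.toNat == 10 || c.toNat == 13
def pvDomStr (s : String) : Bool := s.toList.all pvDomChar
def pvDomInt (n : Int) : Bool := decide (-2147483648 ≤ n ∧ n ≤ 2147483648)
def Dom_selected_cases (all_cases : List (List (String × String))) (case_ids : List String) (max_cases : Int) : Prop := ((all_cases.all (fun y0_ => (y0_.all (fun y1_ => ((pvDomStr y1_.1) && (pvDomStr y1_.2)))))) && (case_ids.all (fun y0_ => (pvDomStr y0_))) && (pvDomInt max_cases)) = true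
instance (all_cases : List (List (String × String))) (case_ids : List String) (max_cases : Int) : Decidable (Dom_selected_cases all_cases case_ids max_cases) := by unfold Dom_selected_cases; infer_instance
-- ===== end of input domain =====

-- One honest line: B replaces A's membership-filter comprehension with an inverted index
-- (positions grouped by case_id, wanted position lists gathered and sorted, cases fetched
-- by position) before the same truncation — an alternative algorithm of similar cost.

-- ===== PORT A =====
-- case['case_id'] : first-match lookup; none = KeyError (excluded by Pre_)
def pvCaseId? (c : List (String × String)) : Option String := (PySem.Dict.mk c).get? "case_id"

-- the membership test "case['case_id'] in wanted" (the none branch is the KeyError region, excluded by Pre_)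
def pvMatch (wanted : PySem.Set String) (c : List (String × String)) : Bool :=
  match pvCaseId? c with
  | some v => PySem.Set.contains wanted v
  | none => false

def selected_cases (all_cases : List (List (String × String))) (case_ids : List String) (max_cases : Int) : List (List (String × String)) :=
  let cases := all_cases
  let cases :=
    if !case_ids.isEmpty then
      let wanted : PySem.Set String := PySem.Set.ofList case_ids
      cases.filter (fun case => pvMatch wanted case)
    else cases
  if max_cases > 0 then PySem.List.slice cases none (some max_cases) else cases

-- ===== PORT B =====
-- Source B's index-building loop: for pos, case in enumerate(all_cases): by_id.setdefault(case['case_id'], []).append(pos)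
-- (keyed by Option String: the 'none' key is only reached where Python B raises KeyError, outside Pre_)
def pvBuildIdx (xs : List (List (String × String))) : PySem.Dict (Option String) (List Int) :=
  (PySem.List.enumerate xs 0).foldl (fun d pr => d.modify (pvCaseId? pr.2) [] (· ++ [pr.1])) PySem.Dict.empty

def selected_cases_alt (all_cases : List (List (String × String))) (case_ids : List String) (max_cases : Int) : List (List (String × String)) :=
  let cases :=
    if !case_ids.isEmpty then
      let byId := pvBuildIdx all_cases
      let positions := PySem.List.sorted
        ((PySem.Set.ofList case_ids).flatMap (fun cid => byId.getD (some cid) []))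
        (fun p => p) false
      -- all_cases[p]: every collected position is in range, so the default of pyGetD is never used
      positions.map (fun p => PySem.List.pyGetD all_cases p [])
    else all_cases
  if max_cases > 0 then PySem.List.slice cases none (some max_cases) else cases

-- ===== PRECONDITION & SPEC =====
-- Pre_ excludes exactly the inputs where Python A raises KeyError: a non-empty case_ids
-- together with some case dict lacking the 'case_id' key (Python B raises there too).
def Pre_selected_cases (all_cases : List (List (String × String))) (case_ids : List String) (max_cases : Int) : Prop :=
  case_ids = [] ∨ ∀ c ∈ all_cases, (pvCaseId? c).isSome
instance (all_cases : List (List (String × String))) (case_ids : List String) (max_cases : Int) : Decidable (Pre_selected_cases all_cases case_ids max_cases) := by unfold Pre_selected_cases; infer_instance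

def pvWitness_selected_cases : (List (List (String × String))) × List String × Int :=
  ([[("case_id", "a"), ("x", "1")], [("case_id", "b")]], ["a", "c"], 1)

def Spec_selected_cases (all_cases : List (List (String × String))) (case_ids : List String) (max_cases : Int) (out : List (List (String × String))) : Prop := out = selected_cases_alt all_cases case_ids max_cases
instance (all_cases : List (List (String × String))) (case_ids : List String) (max_cases : Int) (out : List (List (String × String))) : Decidable (Spec_selected_cases all_cases case_ids max_cases out) := by unfold Spec_selected_cases; infer_instance

-- ===== CLAIM (what is proved, stated in full; the proofs are below) =====
def Claim_equal_selected_cases : Prop := ∀ (all_cases : List (List (String × String))) (case_ids : List String) (max_cases : Int), Dom_selected_cases all_cases case_ids max_cases → Pre_selected_cases all_cases case_ids max_cases → Spec_selected_cases all_cases case_ids max_cases (selected_cases all_cases case_ids max_cases)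

-- ===== LEMMAS AND PROOFS =====

-- membership test written against the raw id list (used as the common form of both sides)
def pvMatchL (ids : List String) (c : List (String × String)) : Bool :=
  match pvCaseId? c with
  | some v => ids.contains v
  | none => false

-- A's test against set(case_ids) is the test against case_ids itself
lemma pvMatch_ofList (ids : List String) (c : List (String × String)) :
    pvMatch (PySem.Set.ofList ids) c = pvMatchL ids c := by
  unfold pvMatch pvMatchL
  cases pvCaseId? c with
  | none => rfl
  | some v =>
    simp only [PySem.Set.contains, List.contains_eq_mem, PySem.Set.mem_ofList]

-- the test against set(ids)-as-a-list is also the test against ids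
lemma pvMatchL_ofList (ids : List String) (c : List (String × String)) :
    pvMatchL (PySem.Set.ofList ids) c = pvMatchL ids c := by
  unfold pvMatchL
  cases pvCaseId? c with
  | none => rfl
  | some v =>
    simp only [List.contains_eq_mem, PySem.Set.mem_ofList]

-- the index's entry for key k: the positions (in order) whose case has id k
lemma pvBuildIdx_getD (xs : List (List (String × String))) (k : Option String) :
    (pvBuildIdx xs).getD k [] =
      ((PySem.List.enumerate xs 0).filter (fun pr => pvCaseId? pr.2 == k)).map (·.1) := by
  unfold pvBuildIdx
  have h := PySem.Dict.getD_foldl_modify_append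
    (l := (PySem.List.enumerate xs 0).map (fun pr => (pvCaseId? pr.2, pr.1)))
    (d := PySem.Dict.empty) (c := k)
  rw [List.foldl_map] at h
  simpa [List.filter_map, Function.comp, List.map_map] using h

-- a filter by a disjunction of two disjoint tests is a permutation of the two filters appended
lemma filter_or_perm {α : Type} (p q : α → Bool) (l : List α)
    (hdisj : ∀ x, ¬(p x = true ∧ q x = true)) :
    (l.filter (fun x => p x || q x)).Perm (l.filter p ++ l.filter q) := by
  induction l with
  | nil => simp
  | cons a t ih =>
    by_cases hp : p a = true
    · have hq : q a = false := by
        cases hqa : q a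
        · rfl
        · exact absurd ⟨hp, hqa⟩ (hdisj a)
      simpa [hp, hq] using ih.cons a
    · cases hqa : q a
      · simpa [Bool.eq_false_iff.mpr hp, hqa] using ih
      · simp only [List.filter_cons, Bool.eq_false_iff.mpr hp, hqa, Bool.false_or]
        exact (ih.cons a).trans List.perm_middle.symm

-- gathering the per-id position sources over distinct ids is a permutation of one combined filter
lemma flatMap_filter_perm (xs : List (List (String × String))) :
    ∀ (ds : List String), ds.Nodup →
      (ds.flatMap (fun cid => (PySem.List.enumerate xs 0).filter
          (fun pr => pvCaseId? pr.2 == some cid))).Perm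
        ((PySem.List.enumerate xs 0).filter (fun pr => pvMatchL ds pr.2)) := by
  intro ds
  induction ds with
  | nil =>
    intro _
    have hf : (PySem.List.enumerate xs 0).filter (fun pr => pvMatchL [] pr.2) = [] :=
      List.filter_eq_nil_iff.mpr (fun pr _ => by unfold pvMatchL; cases pvCaseId? pr.2 <;> simp)
    simp [hf]
  | cons d ds' ih =>
    intro hnd
    rcases List.nodup_cons.mp hnd with ⟨hdni, hnd'⟩
    have hsplit : ∀ pr : Int × List (String × String),
        pvMatchL (d :: ds') pr.2 =
          ((pvCaseId? pr.2 == some d) || pvMatchL ds' pr.2) := by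
      intro pr
      unfold pvMatchL
      cases pvCaseId? pr.2 with
      | none => rfl
      | some v =>
        by_cases hvd : v = d <;> simp [hvd]
    have hdisj : ∀ pr : Int × List (String × String),
        ¬((pvCaseId? pr.2 == some d) = true ∧ pvMatchL ds' pr.2 = true) := by
      intro pr ⟨h1, h2⟩
      unfold pvMatchL at h2
      cases hc : pvCaseId? pr.2 with
      | none => rw [hc] at h2; exact Bool.false_ne_true h2
      | some v =>
        rw [hc] at h1 h2
        have hv : v = d := by simpa using h1
        have hvmem : v ∈ ds' := by simpa using h2
        exact hdni (hv ▸ hvmem)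
    have hstep : ((d :: ds').flatMap (fun cid => (PySem.List.enumerate xs 0).filter
          (fun pr => pvCaseId? pr.2 == some cid))) =
        (PySem.List.enumerate xs 0).filter (fun pr => pvCaseId? pr.2 == some d) ++
          ds'.flatMap (fun cid => (PySem.List.enumerate xs 0).filter
            (fun pr => pvCaseId? pr.2 == some cid)) := by
      simp [List.flatMap_cons]
    rw [hstep, List.filter_congr (fun pr _ => hsplit pr)]
    exact (List.Perm.append_left _ (ih hnd')).trans
      (filter_or_perm _ _ _ hdisj).symm

-- fetching each filtered position gives back its case
lemma map_pyGetD_filtered (xs : List (List (String × String)))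
    (p : (Int × List (String × String)) → Bool) :
    (((PySem.List.enumerate xs 0).filter p).map (·.1)).map
        (fun i => PySem.List.pyGetD xs i []) =
      ((PySem.List.enumerate xs 0).filter p).map (·.2) := by
  rw [List.map_map]
  apply List.map_congr_left
  intro pr hpr
  have hmem := List.mem_of_mem_filter hpr
  rcases (PySem.List.mem_enumerate_iff xs 0 pr).mp hmem with ⟨k, hk, rfl⟩
  simp [PySem.List.pyGetD_natCast, List.getD_eq_getElem?_getD, List.getElem?_eq_getElem hk]

-- B's filtered branch computes A's filtered branch
lemma alt_branch_eq (xs : List (List (String × String))) (ids : List String) :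
    (PySem.List.sorted
        ((PySem.Set.ofList ids).flatMap (fun cid => (pvBuildIdx xs).getD (some cid) []))
        (fun p => p) false).map (fun p => PySem.List.pyGetD xs p []) =
      xs.filter (fun c => pvMatchL ids c) := by
  have hnd : (PySem.Set.ofList ids).Nodup := PySem.Set.nodup_ofList ids
  have hfil : (PySem.List.enumerate xs 0).filter
        (fun pr => pvMatchL (PySem.Set.ofList ids) pr.2) =
      (PySem.List.enumerate xs 0).filter (fun pr => pvMatchL ids pr.2) :=
    List.filter_congr (fun pr _ => pvMatchL_ofList ids pr.2)
  have hEqFlat : (PySem.Set.ofList ids).flatMap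
        (fun cid => (pvBuildIdx xs).getD (some cid) []) =
      ((PySem.Set.ofList ids).flatMap (fun cid => (PySem.List.enumerate xs 0).filter
        (fun pr => pvCaseId? pr.2 == some cid))).map (·.1) := by
    rw [List.map_flatMap]
    exact List.flatMap_congr (fun cid _ => pvBuildIdx_getD xs (some cid))
  have hperm' : ((PySem.Set.ofList ids).flatMap
        (fun cid => (pvBuildIdx xs).getD (some cid) [])).Perm
      (((PySem.List.enumerate xs 0).filter (fun pr => pvMatchL ids pr.2)).map (·.1)) := by
    rw [hEqFlat, ← hfil]
    exact (flatMap_filter_perm xs (PySem.Set.ofList ids) hnd).map (·.1)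
  have hpw : (((PySem.List.enumerate xs 0).filter
        (fun pr => pvMatchL ids pr.2)).map (·.1)).Pairwise (· < ·) :=
    List.pairwise_map.mpr ((PySem.List.pairwise_lt_enumerate xs 0).filter _)
  have hs := PySem.List.sorted_eq_of_perm_of_pairwise_lt _ _ (fun p : Int => p)
    hperm'.symm (by exact hpw)
  rw [hs, map_pyGetD_filtered]
  have hswap : ((PySem.List.enumerate xs 0).map (·.2)).filter (fun c => pvMatchL ids c) =
      ((PySem.List.enumerate xs 0).filter (fun pr => pvMatchL ids pr.2)).map (·.2) := by
    rw [List.filter_map]; rfl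
  rw [← hswap, PySem.List.map_snd_enumerate]

-- ===== VERDICT (by name: the statement is the Claim_ definition above) =====
theorem selected_cases_spec : Claim_equal_selected_cases := by
  intro all_cases case_ids max_cases _ _
  unfold Spec_selected_cases selected_cases selected_cases_alt
  by_cases he : case_ids.isEmpty = true
  · simp [he]
  · simp only [he, Bool.not_false, if_pos]
    rw [alt_branch_eq all_cases case_ids,
      List.filter_congr (fun c _ => pvMatch_ofList case_ids c)]
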